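-- pv_equiv track=rewrite | github.com/zellux/paperwise | src/zapis/api/routes/documents.py | _normalized_values
-- ===== SOURCE A (Python) =====
-- def _normalize_name(value: str) -> str:
--     cleaned = "".join(ch.lower() if ch.isalnum() else " " for ch in value)
--     return " ".join(cleaned.split())
--
-- def _normalized_values(values: list[str] | None) -> set[str]:
--     normalized: set[str] = set()
--     for value in values or []:
--         for part in value.split(","):
--             item = _normalize_name(part)
--             if item:
--                 normalized.add(item)
--     return normalized
-- ===== SOURCE B (Python) =====
-- def _normalized_values(values):
--     normalized = set()
--     for value in values or []:
--         tokens = []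
--         cur = []
--         for ch in value:
--             if ch.isalnum():
--                 cur.append(ch.lower())
--             else:
--                 if cur:
--                     tokens.append("".join(cur))
--                     cur = []
--                 if ch == ",":
--                     if tokens:
--                         normalized.add(" ".join(tokens))
--                     tokens = []
--         if cur:
--             tokens.append("".join(cur))
--         if tokens:
--             normalized.add(" ".join(tokens))
--     return normalized
-- ===== Notes on version B (the rewrite author's own statement) =====
-- stated objective: alternative
-- what changed: Replaces A's per-piece pipeline (comma split, build a cleaned copy of the string, whitespace re-split, join) by a single character-level state machine over each value that accumulates the current token and the current item's tokens directly, emitting an item at each comma and at end of string.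
import Mathlib
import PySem

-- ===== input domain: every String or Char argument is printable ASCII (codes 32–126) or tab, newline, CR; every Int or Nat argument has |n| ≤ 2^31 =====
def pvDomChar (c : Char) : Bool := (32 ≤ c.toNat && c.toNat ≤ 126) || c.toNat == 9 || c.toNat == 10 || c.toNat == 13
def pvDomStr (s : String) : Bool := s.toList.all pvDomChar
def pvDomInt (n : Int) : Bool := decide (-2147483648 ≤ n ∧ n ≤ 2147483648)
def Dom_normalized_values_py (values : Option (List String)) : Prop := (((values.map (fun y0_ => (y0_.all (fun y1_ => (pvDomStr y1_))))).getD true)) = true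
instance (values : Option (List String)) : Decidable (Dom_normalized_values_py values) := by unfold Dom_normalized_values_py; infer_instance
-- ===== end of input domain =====

-- B replaces A's clean/split/join pipeline per comma-piece by a single character-level
-- state machine over each value (objective: alternative; same return value).

-- ===== PORT A =====
-- ch.lower() if ch.isalnum() else " "
def pvCleanChar (ch : Char) : Char :=
  if PySem.Chars.isalnum ch then PySem.Chars.lowerChar ch else ' '

-- _normalize_name, on the char-list side (PySem.Str.* are thin wrappers over PySem.Chars.*)
def pvNormalizeName (value : List Char) : List Char :=
  let cleaned := value.map pvCleanChar
  PySem.Chars.join [' '] (PySem.Chars.split₀ cleaned)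

def normalized_values_py (values : Option (List String)) : List String :=
  (values.getD []).foldl
    (fun normalized value =>
      (PySem.Chars.splitOn value.toList [',']).foldl
        (fun normalized part =>
          let item := pvNormalizeName part
          if item ≠ [] then PySem.Set.add normalized (String.ofList item) else normalized)
        normalized)
    PySem.Set.empty

-- ===== PORT B =====
-- one step of Source B's inner character loop; state = (normalized, tokens, cur)
def pvStepB (st : PySem.Set String × List (List Char) × List Char) (ch : Char) :
    PySem.Set String × List (List Char) × List Char :=
  let (normalized, tokens, cur) := st
  if PySem.Chars.isalnum ch then
    (normalized, tokens, cur ++ [PySem.Chars.lowerChar ch])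
  else
    let tc := if cur ≠ [] then (tokens ++ [cur], ([] : List Char)) else (tokens, cur)
    if ch = ',' then
      (if tc.1 ≠ [] then PySem.Set.add normalized (String.ofList (PySem.Chars.join [' '] tc.1))
       else normalized, [], tc.2)
    else
      (normalized, tc.1, tc.2)

def normalized_values_py_alt (values : Option (List String)) : List String :=
  (values.getD []).foldl
    (fun normalized value =>
      let st := value.toList.foldl pvStepB (normalized, [], [])
      let tokens := if st.2.2 ≠ [] then st.2.1 ++ [st.2.2] else st.2.1
      if tokens ≠ [] then PySem.Set.add st.1 (String.ofList (PySem.Chars.join [' '] tokens))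
      else st.1)
    PySem.Set.empty

-- ===== PRECONDITION & SPEC =====
def Spec_normalized_values_py (values : Option (List String)) (out : List String) : Prop := out = normalized_values_py_alt values
instance (values : Option (List String)) (out : List String) : Decidable (Spec_normalized_values_py values out) := by unfold Spec_normalized_values_py; infer_instance

-- ===== CLAIM (what is proved, stated in full; the proofs are below) =====
def Claim_equal_normalized_values_py : Prop := ∀ (values : Option (List String)), Dom_normalized_values_py values → Spec_normalized_values_py values (normalized_values_py values)

-- ===== LEMMAS AND PROOFS =====

-- whitespace tokenizer: split₀.go without the result accumulator (cur is reversed)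
def pvW : List Char → List Char → List (List Char)
  | [], cur => if cur = [] then [] else [cur.reverse]
  | c :: cs, cur =>
    if PySem.Chars.isspace c then
      (if cur = [] then pvW cs [] else cur.reverse :: pvW cs [])
    else pvW cs (c :: cur)

-- comma splitter: splitOn.go for sep = [','] without fuel and accumulator
def pvPieces : List Char → List Char → List (List Char)
  | [], cur => [cur.reverse]
  | c :: cs, cur => if c = ',' then cur.reverse :: pvPieces cs [] else pvPieces cs (c :: cur)

def pvEmit (s : PySem.Set String) (toks : List (List Char)) : PySem.Set String :=
  if toks ≠ [] then PySem.Set.add s (String.ofList (PySem.Chars.join [' '] toks)) else s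

def pvAddW (s : PySem.Set String) (p : List Char) : PySem.Set String :=
  pvEmit s (pvW (p.map pvCleanChar) [])

theorem pv_split₀_go_eq (cs : List Char) : ∀ cur acc,
    PySem.Chars.split₀.go cs cur acc = acc.reverse ++ pvW cs cur := by
  induction cs with
  | nil =>
      intro cur acc
      by_cases h : cur = [] <;> simp [PySem.Chars.split₀.go, pvW, h]
  | cons c cs ih =>
      intro cur acc
      by_cases hs : PySem.Chars.isspace c
      · by_cases h : cur = [] <;> simp [PySem.Chars.split₀.go, pvW, hs, h, ih]
      · simp [PySem.Chars.split₀.go, pvW, hs, ih]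

theorem pv_split₀_eq (cs : List Char) : PySem.Chars.split₀ cs = pvW cs [] := by
  simp [PySem.Chars.split₀, pv_split₀_go_eq]

theorem pv_splitOn_go_eq : ∀ (fuel : Nat) (cs cur : List Char) (accs : List (List Char)),
    cs.length < fuel →
    PySem.Chars.splitOn.go [','] fuel cs cur accs = accs.reverse ++ pvPieces cs cur := by
  intro fuel
  induction fuel with
  | zero => intro cs cur accs h; omega
  | succ n ih =>
      intro cs cur accs h
      cases cs with
      | nil => simp [PySem.Chars.splitOn.go, pvPieces]
      | cons c rest =>
          simp only [List.length_cons] at h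
          by_cases hc : c = ','
          · subst hc
            rw [show PySem.Chars.splitOn.go [','] (n+1) (','::rest) cur accs =
              PySem.Chars.splitOn.go [','] n rest [] (cur.reverse :: accs) by
                simp [PySem.Chars.splitOn.go, List.isPrefixOf]]
            rw [ih rest [] (cur.reverse :: accs) (by omega)]
            simp [pvPieces]
          · rw [show PySem.Chars.splitOn.go [','] (n+1) (c::rest) cur accs =
              PySem.Chars.splitOn.go [','] n rest (c :: cur) accs by
                simp only [PySem.Chars.splitOn.go, List.isPrefixOf]
                rw [if_neg (by simp; exact fun h2 => absurd h2.symm hc)]]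
            rw [ih rest (c :: cur) accs (by omega)]
            simp [pvPieces, hc]

theorem pv_splitOn_eq (cs : List Char) :
    PySem.Chars.splitOn cs [','] = pvPieces cs [] := by
  simp [PySem.Chars.splitOn, pv_splitOn_go_eq cs.length.succ cs [] [] (Nat.lt_succ_self _)]

theorem pv_isspace_false (d : Char) (h1 : 33 ≤ d.toNat) (h2 : d.toNat ≤ 132) :
    PySem.Chars.isspace d = false := by
  simp only [PySem.Chars.isspace, Bool.or_eq_false_iff, Bool.and_eq_false_iff,
    decide_eq_false_iff_not]
  omega

theorem pv_nspace (c : Char) (h : PySem.Chars.isalnum c = true) :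
    PySem.Chars.isspace (PySem.Chars.lowerChar c) = false := by
  simp only [PySem.Chars.isalnum, PySem.Chars.isalpha, PySem.Chars.isdigit,
    PySem.Chars.isupper, PySem.Chars.islower, Bool.or_eq_true,
    Bool.and_eq_true, decide_eq_true_eq, Char.le_def,
    UInt32.le_iff_toNat_le, Char.toNat_val,
    show ('A').toNat = 65 from rfl, show ('Z').toNat = 90 from rfl,
    show ('a').toNat = 97 from rfl, show ('z').toNat = 122 from rfl,
    show ('0').toNat = 48 from rfl, show ('9').toNat = 57 from rfl] at h
  apply pv_isspace_false
  all_goals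
    simp only [PySem.Chars.lowerChar, PySem.Chars.isupper, Bool.and_eq_true,
      decide_eq_true_eq, Char.le_def, UInt32.le_iff_toNat_le, Char.toNat_val,
      show ('A').toNat = 65 from rfl, show ('Z').toNat = 90 from rfl]
    split
    · next hu =>
        rw [Char.toNat_ofNat, if_pos (by unfold Nat.isValidChar; left; omega)]; omega
    · next hu => rcases h with (⟨h1, h2⟩ | ⟨h1, h2⟩) | ⟨h1, h2⟩ <;> omega

theorem pv_isalnum_comma : PySem.Chars.isalnum ',' = false := by decide

theorem pvW_ne_nil : ∀ (cs cur : List Char), ∀ w ∈ pvW cs cur, w ≠ [] := by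
  intro cs
  induction cs with
  | nil =>
      intro cur w hw
      by_cases h : cur = [] <;> simp [pvW, h] at hw
      subst hw; simp [h]
  | cons c cs ih =>
      intro cur w hw
      by_cases hs : PySem.Chars.isspace c
      · by_cases h : cur = [] <;> simp [pvW, hs, h] at hw
        · exact ih [] w hw
        · rcases hw with hw | hw
          · subst hw; simp [h]
          · exact ih [] w hw
      · simp [pvW, hs] at hw
        exact ih _ w hw

theorem pv_join_ne_nil (w : List Char) (ws : List (List Char)) (hw : w ≠ []) :
    PySem.Chars.join [' '] (w :: ws) ≠ [] := by
  cases ws with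
  | nil => simpa [PySem.Chars.join, List.intercalate] using hw
  | cons w2 ws =>
      simp [PySem.Chars.join, List.intercalate, List.intersperse, hw]

theorem pv_addA_eq (s : PySem.Set String) (p : List Char) :
    (let item := pvNormalizeName p;
     if item ≠ [] then PySem.Set.add s (String.ofList item) else s) = pvAddW s p := by
  unfold pvNormalizeName pvAddW pvEmit
  simp only [pv_split₀_eq]
  cases hw : pvW (p.map pvCleanChar) [] with
  | nil => simp [PySem.Chars.join, List.intercalate]
  | cons w ws =>
      have hwne : w ≠ [] := pvW_ne_nil _ _ w (by rw [hw]; exact List.mem_cons_self ..)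
      simp [pv_join_ne_nil w ws hwne]

theorem pvPieces_acc : ∀ (cs acc : List Char), ∃ q qs,
    pvPieces cs [] = q :: qs ∧ pvPieces cs acc = (acc.reverse ++ q) :: qs := by
  intro cs
  induction cs with
  | nil => intro acc; exact ⟨[], [], rfl, by simp [pvPieces]⟩
  | cons c cs ih =>
      intro acc
      by_cases hc : c = ','
      · subst hc
        exact ⟨[], pvPieces cs [], by simp [pvPieces], by simp [pvPieces]⟩
      · obtain ⟨q, qs, h0, h1⟩ := ih [c]
        obtain ⟨q', qs', h0', h2⟩ := ih (c :: acc)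
        rw [h0] at h0'
        injection h0' with e1 e2
        subst e1; subst e2
        refine ⟨c :: q, qs, ?_, ?_⟩
        · simpa [pvPieces, hc] using h1
        · simp only [pvPieces, hc]
          rw [h2]; simp

-- main loop invariant: B's machine over cs, from state (s, toks, cur), equals A's fold
-- over the comma pieces of cs, with (toks, cur) pending into the first piece
theorem pv_machine_eq : ∀ (cs : List Char) (s : PySem.Set String)
    (toks : List (List Char)) (cur : List Char) (p : List Char) (ps : List (List Char)),
    pvPieces cs [] = p :: ps →
    (let st := cs.foldl pvStepB (s, toks, cur)
     let tokens := if st.2.2 ≠ [] then st.2.1 ++ [st.2.2] else st.2.1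
     if tokens ≠ [] then PySem.Set.add st.1 (String.ofList (PySem.Chars.join [' '] tokens))
     else st.1)
    = ps.foldl pvAddW (pvEmit s (toks ++ pvW (p.map pvCleanChar) cur.reverse)) := by
  intro cs
  induction cs with
  | nil =>
      intro s toks cur p ps h
      simp only [pvPieces, List.reverse_nil] at h
      injection h with e1 e2; subst e1; subst e2
      by_cases hcur : cur = [] <;>
        simp [pvW, pvEmit, hcur, List.reverse_eq_nil_iff]
  | cons c cs ih =>
      intro s toks cur p ps h
      simp only [List.foldl_cons]
      by_cases hc : c = ','
      · subst hc
        simp only [pvPieces, List.reverse_nil, reduceIte] at h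
        injection h with e1 e2; subst e1; subst e2
        obtain ⟨q, qs, h0, -⟩ := pvPieces_acc cs []
        have hstep : pvStepB (s, toks, cur) ',' =
            (pvEmit s (toks ++ pvW ([].map pvCleanChar) cur.reverse), [], []) := by
          by_cases hcur : cur = [] <;>
            simp [pvStepB, pv_isalnum_comma, pvEmit, pvW, hcur, List.reverse_eq_nil_iff]
        rw [hstep, ih _ [] [] q qs h0, h0]
        simp [pvAddW]
      · have hpieces : pvPieces (c :: cs) [] = pvPieces cs [c] := by simp [pvPieces, hc]
        obtain ⟨q, qs, h0, h1⟩ := pvPieces_acc cs [c]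
        rw [hpieces, h1] at h
        simp only [List.reverse_cons, List.reverse_nil, List.nil_append, List.singleton_append] at h
        injection h with e1 e2; subst e2
        by_cases ha : PySem.Chars.isalnum c
        · have hstep : pvStepB (s, toks, cur) c =
              (s, toks, cur ++ [PySem.Chars.lowerChar c]) := by simp [pvStepB, ha]
          rw [hstep, ih _ toks (cur ++ [PySem.Chars.lowerChar c]) q qs h0, ← e1]
          simp [pvCleanChar, ha, pvW, pv_nspace c ha]
        · by_cases hcur : cur = []
          · have hstep : pvStepB (s, toks, cur) c = (s, toks, cur) := by
              simp [pvStepB, ha, hc, hcur]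
            rw [hstep, ih _ toks cur q qs h0, ← e1]
            simp [pvCleanChar, ha, pvW, hcur, show PySem.Chars.isspace ' ' = true from rfl]
          · have hstep : pvStepB (s, toks, cur) c = (s, toks ++ [cur], []) := by
              simp [pvStepB, ha, hc, hcur]
            rw [hstep, ih _ (toks ++ [cur]) [] q qs h0, ← e1]
            simp [pvCleanChar, ha, pvW, hcur, List.reverse_eq_nil_iff,
              show PySem.Chars.isspace ' ' = true from rfl]

theorem pv_inner_eq (s : PySem.Set String) (value : String) :
    (PySem.Chars.splitOn value.toList [',']).foldl
        (fun normalized part =>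
          let item := pvNormalizeName part
          if item ≠ [] then PySem.Set.add normalized (String.ofList item) else normalized) s
    = (let st := value.toList.foldl pvStepB (s, [], [])
       let tokens := if st.2.2 ≠ [] then st.2.1 ++ [st.2.2] else st.2.1
       if tokens ≠ [] then PySem.Set.add st.1 (String.ofList (PySem.Chars.join [' '] tokens))
       else st.1) := by
  obtain ⟨p, ps, h0, -⟩ := pvPieces_acc value.toList []
  rw [pv_splitOn_eq, pv_machine_eq value.toList s [] [] p ps h0]
  have hf : (fun (normalized : PySem.Set String) (part : List Char) =>
      let item := pvNormalizeName part
      if item ≠ [] then PySem.Set.add normalized (String.ofList item) else normalized) = pvAddW := by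
    funext s p; exact pv_addA_eq s p
  rw [hf, h0]
  simp [List.foldl_cons, pvAddW]

-- ===== VERDICT (by name: the statement is the Claim_ definition above) =====
theorem normalized_values_py_spec : Claim_equal_normalized_values_py := by
  intro values _
  unfold Spec_normalized_values_py normalized_values_py normalized_values_py_alt
  simp only [pv_inner_eq]
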